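-- pv_equiv track=rewrite | github.com/Japie10/event-selector | src/event_selector/core/models.py | validate_mk1_address_range
-- ===== SOURCE A (Python) =====
-- MK1_RANGES = {
--     "Data": (0x000, 0x07F),      # IDs 0-3
--     "Network": (0x200, 0x27F),   # IDs 4-7
--     "Application": (0x400, 0x47F) # IDs 8-11
-- }
--
-- def validate_mk1_address_range(address: str) -> tuple[str, int, int]:
--     """Validate MK1 address is in valid range.
--
--     Args:
--         address: Normalized address string
--
--     Returns:
--         Tuple of (range_name, id, bit)
--
--     Raises:
--         ValueError: If address is out of valid ranges
--     """
--     addr_value = int(address, 16)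
--
--     for range_name, (start, end) in MK1_RANGES.items():
--         if start <= addr_value <= end:
--             base_id = {
--                 "Data": 0,
--                 "Network": 4,
--                 "Application": 8
--             }[range_name]
--
--             offset = addr_value - start
--             id_num = base_id + (offset // 32)
--             bit = offset % 32
--
--             return range_name, id_num, bit
--
--     raise ValueError(
--         f"Address {address} not in valid MK1 ranges. "
--         f"Valid ranges: Data(0x000-0x07F), Network(0x200-0x27F), Application(0x400-0x47F)"
--     )
-- ===== SOURCE B (Python) =====
-- def validate_mk1_address_range(address: str) -> tuple[str, int, int]:
--     """Direct arithmetic: ranges are 0x200-spaced, 0x80-wide blocks."""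
--     addr_value = int(address, 16)
--     block, offset = divmod(addr_value, 0x200)
--     if 0 <= block <= 2 and offset <= 0x7F:
--         return (["Data", "Network", "Application"][block],
--                 block * 4 + offset // 32, offset % 32)
--     raise ValueError(
--         f"Address {address} not in valid MK1 ranges. "
--         f"Valid ranges: Data(0x000-0x07F), Network(0x200-0x27F), Application(0x400-0x47F)"
--     )
-- ===== Notes on version B (the rewrite author's own statement) =====
-- stated objective: simpler
-- what changed: Replaces the scan over the MK1_RANGES dict (and the base-id lookup dict) with one divmod by 0x200 exploiting the regular range layout, computing range name, id and bit by direct arithmetic.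
import Mathlib
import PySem

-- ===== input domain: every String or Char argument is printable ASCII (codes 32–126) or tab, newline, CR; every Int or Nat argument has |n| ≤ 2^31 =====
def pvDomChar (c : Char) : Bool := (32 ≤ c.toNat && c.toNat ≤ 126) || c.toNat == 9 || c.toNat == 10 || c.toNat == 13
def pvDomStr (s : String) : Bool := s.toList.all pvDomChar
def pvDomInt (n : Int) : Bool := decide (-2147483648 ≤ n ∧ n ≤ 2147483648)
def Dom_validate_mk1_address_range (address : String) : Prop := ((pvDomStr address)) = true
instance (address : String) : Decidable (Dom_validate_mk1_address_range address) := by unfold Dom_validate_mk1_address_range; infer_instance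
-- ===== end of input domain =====

-- B replaces A's scan over the ranges dict with one divmod by 0x200 and direct arithmetic (objective: simpler).

-- ===== PORT A =====
-- MK1_RANGES.items() in insertion order
def pvMK1Ranges : List (String × (Int × Int)) :=
  [("Data", (0x000, 0x07F)), ("Network", (0x200, 0x27F)), ("Application", (0x400, 0x47F))]

-- the inline base_id dict lookup; keys are always present on the paths taken
def pvBaseId (name : String) : Int :=
  ((PySem.Dict.get? (PySem.Dict.ofList [("Data", (0:Int)), ("Network", 4), ("Application", 8)]) name).getD 0)

-- the for-loop over MK1_RANGES.items(); none = falls through to the raise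
def pvScan (n : Int) : List (String × (Int × Int)) → Option (String × Int × Int)
  | [] => none
  | (name, (s, e)) :: rest =>
      if s ≤ n ∧ n ≤ e then
        some (name, pvBaseId name + PySem.Int.floordiv (n - s) 32, PySem.Int.mod (n - s) 32)
      else pvScan n rest

def validate_mk1_address_range (address : String) : String × Int × Int :=
  match PySem.Int.ofStrBase? address 16 with
  | none => ("", 0, 0)   -- int(address, 16) raises ValueError: outside Pre_
  | some n =>
      match pvScan n pvMK1Ranges with
      | some r => r
      | none => ("", 0, 0)  -- raise ValueError: outside Pre_

-- ===== PORT B =====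
def validate_mk1_address_range_alt (address : String) : String × Int × Int :=
  match PySem.Int.ofStrBase? address 16 with
  | none => ("", 0, 0)   -- ValueError: outside Pre_
  | some n =>
      let block := PySem.Int.floordiv n 0x200
      let offset := PySem.Int.mod n 0x200
      if 0 ≤ block ∧ block ≤ 2 ∧ offset ≤ 0x7F then
        ((PySem.List.pyGet? ["Data", "Network", "Application"] block).getD "",
         block * 4 + PySem.Int.floordiv offset 32, PySem.Int.mod offset 32)
      else ("", 0, 0)   -- raise ValueError: outside Pre_

-- ===== PRECONDITION & SPEC =====
-- Pre_: int(address,16) parses and the value lies in one of the three MK1 ranges; elsewhere A raises ValueError.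
def Pre_validate_mk1_address_range (address : String) : Prop :=
  ((PySem.Int.ofStrBase? address 16).any fun n =>
    decide ((0 ≤ n ∧ n ≤ 0x07F) ∨ (0x200 ≤ n ∧ n ≤ 0x27F) ∨ (0x400 ≤ n ∧ n ≤ 0x47F))) = true
instance (address : String) : Decidable (Pre_validate_mk1_address_range address) := by
  unfold Pre_validate_mk1_address_range; infer_instance

def pvWitness_validate_mk1_address_range : String := "210"

def Spec_validate_mk1_address_range (address : String) (out : String × Int × Int) : Prop := out = validate_mk1_address_range_alt address
instance (address : String) (out : String × Int × Int) : Decidable (Spec_validate_mk1_address_range address out) := by unfold Spec_validate_mk1_address_range; infer_instance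

-- ===== CLAIM (what is proved, stated in full; the proofs are below) =====
def Claim_equal_validate_mk1_address_range : Prop := ∀ (address : String), Dom_validate_mk1_address_range address → Pre_validate_mk1_address_range address → Spec_validate_mk1_address_range address (validate_mk1_address_range address)

-- ===== LEMMAS AND PROOFS =====
lemma core_eq (n : Int)
    (h : (0 ≤ n ∧ n ≤ 0x07F) ∨ (0x200 ≤ n ∧ n ≤ 0x27F) ∨ (0x400 ≤ n ∧ n ≤ 0x47F)) :
    (match pvScan n pvMK1Ranges with
      | some r => r
      | none => (("", 0, 0) : String × Int × Int)) =
    (let block := PySem.Int.floordiv n 0x200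
     let offset := PySem.Int.mod n 0x200
     if 0 ≤ block ∧ block ≤ 2 ∧ offset ≤ 0x7F then
        ((PySem.List.pyGet? ["Data", "Network", "Application"] block).getD "",
         block * 4 + PySem.Int.floordiv offset 32, PySem.Int.mod offset 32)
      else ("", 0, 0)) := by
  have he : ∀ m : Int, PySem.Int.floordiv m 0x200 = m / 0x200 := fun m =>
    PySem.Int.floordiv_eq_ediv_of_pos (by norm_num)
  have hm : ∀ m : Int, PySem.Int.mod m 0x200 = m % 0x200 := fun m =>
    PySem.Int.mod_eq_emod_of_pos (by norm_num)
  rcases h with ⟨h1, h2⟩ | ⟨h1, h2⟩ | ⟨h1, h2⟩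
  · have hb : n / 0x200 = 0 := by omega
    have ho : n % 0x200 = n := by omega
    simp only [pvScan, pvMK1Ranges, he, hm, hb, ho]
    rw [if_pos ⟨h1, h2⟩, if_pos ⟨le_refl 0, by norm_num, h2⟩]
    simp [pvBaseId, PySem.List.pyGet?, PySem.Dict.get?, PySem.Dict.ofList]
    decide
  · have hb : n / 0x200 = 1 := by omega
    have ho : n % 0x200 = n - 0x200 := by omega
    simp only [pvScan, pvMK1Ranges, he, hm, hb, ho]
    rw [if_neg (by omega), if_pos ⟨h1, h2⟩, if_pos ⟨by norm_num, by norm_num, by omega⟩]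
    simp [pvBaseId, PySem.List.pyGet?, PySem.Dict.get?, PySem.Dict.ofList]
    decide
  · have hb : n / 0x200 = 2 := by omega
    have ho : n % 0x200 = n - 0x400 := by omega
    simp only [pvScan, pvMK1Ranges, he, hm, hb, ho]
    rw [if_neg (by omega), if_neg (by omega), if_pos ⟨h1, h2⟩,
        if_pos ⟨by norm_num, le_refl 2, by omega⟩]
    simp [pvBaseId, PySem.List.pyGet?, PySem.Dict.get?, PySem.Dict.ofList]
    decide

-- ===== VERDICT (by name: the statement is the Claim_ definition above) =====
theorem validate_mk1_address_range_spec : Claim_equal_validate_mk1_address_range := by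
  intro address _ hpre
  unfold Spec_validate_mk1_address_range validate_mk1_address_range validate_mk1_address_range_alt
  unfold Pre_validate_mk1_address_range at hpre
  cases hp : PySem.Int.ofStrBase? address 16 with
  | none => rw [hp] at hpre
  | some n =>
      rw [hp] at hpre
      rw [Option.any_some, decide_eq_true_eq] at hpre
      exact core_eq n hpre
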